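-- pv_equiv track=rewrite | github.com/lovish1234/TPC | server/dashboard/server.py | get_unique_entity_nested
-- ===== SOURCE A (Python) =====
-- def get_unique_entity_nested(dictionary, class_mapping):
--
--     unique_dictionary = {}
--     for key in dictionary:
--         entity = key
--         if entity in class_mapping:
--             unique_action = class_mapping[entity]
--             if unique_action in unique_dictionary:
--                 unique_dictionary[unique_action] = combine_dict(
--                     unique_dictionary[unique_action], dictionary[key])
--             else:
--                 unique_dictionary[unique_action] = dictionary[key]
--         else:
--             pass
--
--     for key in unique_dictionary:
--         temp_dict = {}
--         for x in unique_dictionary[key]: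
--             if x in class_mapping:
--                 unique_action = class_mapping[x]
--                 if unique_action in temp_dict:
--                     temp_dict[unique_action] += unique_dictionary[key][x]
--                 else:
--                     temp_dict[unique_action] = unique_dictionary[key][x]
--             else:
--                 pass
--         unique_dictionary[key] = temp_dict
--
--     return unique_dictionary
--
-- def combine_dict(dict_1, dict_2):
--
--     comb_dict = {}
--
--     for key in dict_1:
--         if key in dict_2:
--             comb_dict[key] = dict_1[key] + dict_2[key]
--         else:
--             comb_dict[key] = dict_1[key]
--
--     for key in dict_2:
--         if key not in comb_dict:
--             comb_dict[key] = dict_2[key]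
--
--     return comb_dict
-- ===== SOURCE B (Python) =====
-- def get_unique_entity_nested(dictionary, class_mapping):
--     result = {}
--     for outer, inner in dictionary.items():
--         if outer in class_mapping:
--             bucket = result.setdefault(class_mapping[outer], {})
--             for k, v in inner.items():
--                 if k in class_mapping:
--                     ci = class_mapping[k]
--                     bucket[ci] = bucket.get(ci, 0) + v
--     return result
-- ===== Notes on version B (the rewrite author's own statement) =====
-- stated objective: simpler
-- what changed: B replaces A's two-phase pipeline (merge raw inner dicts per class with a combine_dict helper, then a second full pass remapping inner keys) by one direct nested pass that accumulates class-to-class sums in place, with no combine_dict helper and no second pass.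
import Mathlib
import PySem

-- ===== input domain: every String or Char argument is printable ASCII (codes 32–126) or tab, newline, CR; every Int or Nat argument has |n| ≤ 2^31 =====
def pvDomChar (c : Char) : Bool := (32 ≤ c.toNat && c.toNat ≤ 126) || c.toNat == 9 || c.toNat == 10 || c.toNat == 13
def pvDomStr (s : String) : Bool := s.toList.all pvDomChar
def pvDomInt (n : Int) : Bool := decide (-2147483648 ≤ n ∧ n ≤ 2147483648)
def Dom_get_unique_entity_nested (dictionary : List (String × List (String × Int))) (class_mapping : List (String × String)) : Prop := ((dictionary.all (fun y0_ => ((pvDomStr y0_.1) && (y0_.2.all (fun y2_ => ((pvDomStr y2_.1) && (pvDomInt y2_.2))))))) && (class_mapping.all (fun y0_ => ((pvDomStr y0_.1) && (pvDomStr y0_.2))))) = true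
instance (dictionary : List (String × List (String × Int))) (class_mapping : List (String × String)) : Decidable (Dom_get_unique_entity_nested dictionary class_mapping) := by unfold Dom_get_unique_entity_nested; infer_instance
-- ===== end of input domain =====

-- B replaces A's two-phase merge-then-remap (with its combine_dict helper) by one direct nested
-- accumulation pass; proved to return the same dict (same insertion order) on duplicate-free inputs.


-- ===== PORT A =====
-- combine_dict: first loop copies dict_1's entries (adding dict_2's value on shared keys),
-- second loop appends dict_2's entries whose key is not yet present.
def pvCombineDict (d1 d2 : PySem.Dict String Int) : PySem.Dict String Int :=
  let comb := d1.keys.foldl (fun comb k =>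
      if d2.contains k then comb.insert k (d1.getD k 0 + d2.getD k 0)
      else comb.insert k (d1.getD k 0)) PySem.Dict.empty
  d2.keys.foldl (fun comb k =>
      if comb.contains k then comb else comb.insert k (d2.getD k 0)) comb

-- A's second loop body: remap one inner dict through class_mapping, summing collisions.
def pvRemapA (cm : PySem.Dict String String) (d : PySem.Dict String Int) : PySem.Dict String Int :=
  d.keys.foldl (fun temp x =>
    if cm.contains x then
      let ua := cm.getD x ""
      if temp.contains ua then temp.insert ua (temp.getD ua 0 + d.getD x 0)
      else temp.insert ua (d.getD x 0)
    else temp) PySem.Dict.empty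

def get_unique_entity_nested (dictionary : List (String × List (String × Int))) (class_mapping : List (String × String)) : List (String × List (String × Int)) :=
  let cm : PySem.Dict String String := PySem.Dict.mk class_mapping
  let dd : PySem.Dict String (PySem.Dict String Int) :=
    PySem.Dict.mk (dictionary.map (fun p => (p.1, PySem.Dict.mk p.2)))
  let ud := dd.keys.foldl (fun ud key =>
      if cm.contains key then
        let ua := cm.getD key ""
        if ud.contains ua then
          ud.insert ua (pvCombineDict (ud.getD ua PySem.Dict.empty) (dd.getD key PySem.Dict.empty))
        else ud.insert ua (dd.getD key PySem.Dict.empty)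
      else ud) PySem.Dict.empty
  -- second loop: 'for key in unique_dictionary: unique_dictionary[key] = temp_dict' replaces
  -- each value in place, keys unchanged = map over the items
  (ud.items.map (fun p => (p.1, pvRemapA cm p.2))).map (fun p => (p.1, p.2.items))

-- ===== PORT B =====
def get_unique_entity_nested_alt (dictionary : List (String × List (String × Int))) (class_mapping : List (String × String)) : List (String × List (String × Int)) :=
  let cm : PySem.Dict String String := PySem.Dict.mk class_mapping
  let res := dictionary.foldl (fun res p =>
      if cm.contains p.1 then
        let co := cm.getD p.1 ""
        let res := res.setdefault co PySem.Dict.empty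
        -- 'bucket' is an alias of res[co]; each bucket mutation is written back as res.insert co …
        p.2.foldl (fun res kv =>
            if cm.contains kv.1 then
              let ci := cm.getD kv.1 ""
              res.insert co ((res.getD co PySem.Dict.empty).insert ci
                ((res.getD co PySem.Dict.empty).getD ci 0 + kv.2))
            else res) res
      else res) (PySem.Dict.empty : PySem.Dict String (PySem.Dict String Int))
  res.items.map (fun p => (p.1, p.2.items))

-- ===== PRECONDITION & SPEC =====
-- Pre_ excludes association lists whose outer or inner key lists contain duplicates: such a list
-- does not represent a Python dict (dict construction would already have collapsed the duplicates).
def Pre_get_unique_entity_nested (dictionary : List (String × List (String × Int))) (class_mapping : List (String × String)) : Prop :=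
  (dictionary.map (fun p => p.1)).Nodup ∧ ∀ p ∈ dictionary, (p.2.map (fun q => q.1)).Nodup
instance (dictionary : List (String × List (String × Int))) (class_mapping : List (String × String)) : Decidable (Pre_get_unique_entity_nested dictionary class_mapping) := by unfold Pre_get_unique_entity_nested; infer_instance

def pvWitness_get_unique_entity_nested : (List (String × List (String × Int))) × (List (String × String)) :=
  ([("run", [("cat", 1), ("dog", 2)]), ("jog", [("cat", 3)])],
   [("run", "move"), ("jog", "move"), ("cat", "animal"), ("dog", "animal")])

def Spec_get_unique_entity_nested (dictionary : List (String × List (String × Int))) (class_mapping : List (String × String)) (out : List (String × List (String × Int))) : Prop := out = get_unique_entity_nested_alt dictionary class_mapping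
instance (dictionary : List (String × List (String × Int))) (class_mapping : List (String × String)) (out : List (String × List (String × Int))) : Decidable (Spec_get_unique_entity_nested dictionary class_mapping out) := by unfold Spec_get_unique_entity_nested; infer_instance

-- ===== CLAIM (what is proved, stated in full; the proofs are below) =====
def Claim_equal_get_unique_entity_nested : Prop := ∀ (dictionary : List (String × List (String × Int))) (class_mapping : List (String × String)), Dom_get_unique_entity_nested dictionary class_mapping → Pre_get_unique_entity_nested dictionary class_mapping → Spec_get_unique_entity_nested dictionary class_mapping (get_unique_entity_nested dictionary class_mapping)

-- ===== LEMMAS AND PROOFS =====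

-- the normalised inner accumulation step: add kv.2 to the class of kv.1 (skip unmapped keys)
def pvAddC (cm : PySem.Dict String String) (t : PySem.Dict String Int) (kv : String × Int) : PySem.Dict String Int :=
  if cm.contains kv.1 then
    t.insert (cm.getD kv.1 "") (t.getD (cm.getD kv.1 "") 0 + kv.2)
  else t

-- entrywise effect of the first combine_dict loop on an entry of dict_1
def pvCMap (d2 : PySem.Dict String Int) (p : String × Int) : String × Int :=
  (p.1, if d2.contains p.1 then p.2 + d2.getD p.1 0 else p.2)

-- B's view of A's phase-1 state: every stored inner dict already remapped
def pvMV (cm : PySem.Dict String String) (d : PySem.Dict String (PySem.Dict String Int)) : PySem.Dict String (PySem.Dict String Int) :=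
  PySem.Dict.mk (d.items.map (fun p => (p.1, pvRemapA cm p.2)))

theorem pv_foldl_keys_getD {ν σ : Type} (d : PySem.Dict String ν) (hnd : d.keys.Nodup) (dfl : ν) (F : σ → String × ν → σ) (init : σ) :
    d.keys.foldl (fun s k => F s (k, d.getD k dfl)) init = d.items.foldl F init := by
  have hk : d.keys = d.items.map (fun p => p.1) := rfl
  rw [hk, List.foldl_map]
  apply PySem.List.foldl_congr_mem
  intro acc p hp
  have h : d.getD p.1 dfl = p.2 := PySem.Dict.getD_of_mem_items d (by exact hp) hnd dfl
  rw [h]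

theorem pv_insert_getD_self {ν : Type} (d : PySem.Dict String ν) (k : String) (e : ν)
    (hc : d.contains k = true) (hnd : d.keys.Nodup) : d.insert k (d.getD k e) = d := by
  apply PySem.Dict.ext
  rw [PySem.Dict.items_insert_of_contains d _ hc]
  have : ∀ p ∈ d.items, (if (p.1 == k) = true then (k, d.getD k e) else p) = p := by
    intro p hp
    by_cases h : p.1 = k
    · subst h
      have h2 : d.getD p.1 e = p.2 := PySem.Dict.getD_of_mem_items d (by exact hp) hnd e
      simp [h2]
    · simp [h]
  rw [List.map_congr_left this]; simp

theorem pv_insert_insert_comm {ν : Type} (d : PySem.Dict String ν) (c c2 : String) (a b : ν)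
    (hne : c2 ≠ c) (hc : d.contains c = true) :
    (d.insert c a).insert c2 b = (d.insert c2 b).insert c a := by
  apply PySem.Dict.ext
  by_cases h2 : d.contains c2 = true
  · have hca : (d.insert c a).contains c2 = true := by
      rw [PySem.Dict.contains_insert]; simp [h2]
    have hcb : (d.insert c2 b).contains c = true := by
      rw [PySem.Dict.contains_insert]; simp [hc]
    rw [PySem.Dict.items_insert_of_contains _ _ hca, PySem.Dict.items_insert_of_contains _ _ hcb,
        PySem.Dict.items_insert_of_contains d _ h2, PySem.Dict.items_insert_of_contains d _ hc]
    rw [List.map_map, List.map_map]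
    apply List.map_congr_left
    intro p _
    by_cases hp : p.1 = c
    · simp [hp, Ne.symm hne]
    · by_cases hp2 : p.1 = c2 <;> simp [hp, hp2, hne]
  · have h2' : d.contains c2 = false := by simpa using h2
    have hca : (d.insert c a).contains c2 = false := by
      rw [PySem.Dict.contains_insert]; simp [h2', hne]
    have hcb : (d.insert c2 b).contains c = true := by
      rw [PySem.Dict.contains_insert]; simp [hc]
    rw [PySem.Dict.items_insert_of_not_contains _ _ hca, PySem.Dict.items_insert_of_contains _ _ hcb,
        PySem.Dict.items_insert_of_contains d _ hc, PySem.Dict.items_insert_of_not_contains d _ h2']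
    rw [List.map_append]
    congr 1
    simp only [List.map_cons, List.map_nil]
    have : ((c2 : String) == c) = false := by simp [hne]
    simp [this]

theorem pv_addC_out (cm : PySem.Dict String String) (c : String) (w : Int) (zs : List (String × Int)) :
    ∀ t : PySem.Dict String Int, t.contains c = true →
    zs.foldl (pvAddC cm) (t.insert c (t.getD c 0 + w))
      = (zs.foldl (pvAddC cm) t).insert c ((zs.foldl (pvAddC cm) t).getD c 0 + w) := by
  induction zs with
  | nil => intro t ht; simp
  | cons kv zs ih =>
    intro t ht
    simp only [List.foldl_cons]
    by_cases hm : cm.contains kv.1 = true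
    · set c2 := cm.getD kv.1 ""
      by_cases hec : c2 = c
      · -- same class: both sides collapse the two inserts
        subst hec
        have e1 : pvAddC cm (t.insert c2 (t.getD c2 0 + w)) kv
            = t.insert c2 ((t.getD c2 0 + kv.2) + w) := by
          simp only [pvAddC, hm, if_pos]
          rw [PySem.Dict.getD_insert_self, PySem.Dict.insert_insert_self]
          ring_nf
        have e2 : pvAddC cm t kv = t.insert c2 (t.getD c2 0 + kv.2) := by simp [pvAddC, hm, c2]
        rw [e1, e2]
        have : t.insert c2 (t.getD c2 0 + kv.2 + w)
            = (t.insert c2 (t.getD c2 0 + kv.2)).insert c2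
                ((t.insert c2 (t.getD c2 0 + kv.2)).getD c2 0 + w) := by
          rw [PySem.Dict.getD_insert_self, PySem.Dict.insert_insert_self]
        rw [this]
        exact ih _ (PySem.Dict.contains_insert_self _ _ _)
      · -- different class: commute the two inserts
        have e1 : pvAddC cm (t.insert c (t.getD c 0 + w)) kv
            = (pvAddC cm t kv).insert c (t.getD c 0 + w) := by
          simp only [pvAddC, hm, if_pos]
          rw [PySem.Dict.getD_insert_of_ne _ _ _ hec]
          exact (pv_insert_insert_comm t c c2 _ _ hec ht).symm ▸ rfl
        have hgd : (pvAddC cm t kv).getD c 0 = t.getD c 0 := by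
          simp only [pvAddC, hm, if_pos]
          exact PySem.Dict.getD_insert_of_ne _ _ _ (Ne.symm hec)
        rw [e1, ← hgd]
        have hct : (pvAddC cm t kv).contains c = true := by
          simp only [pvAddC, hm, if_pos]
          rw [PySem.Dict.contains_insert]; simp [ht]
        exact ih _ hct
    · have hm' : cm.contains kv.1 = false := by simpa using hm
      simp only [pvAddC, hm', Bool.false_eq_true, ite_false]
      exact ih t ht

theorem pv_addC_mid (cm : PySem.Dict String String) (t : PySem.Dict String Int) (k : String) (v w : Int) (zs : List (String × Int)) :
    zs.foldl (pvAddC cm) (pvAddC cm t (k, v + w))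
      = pvAddC cm (zs.foldl (pvAddC cm) (pvAddC cm t (k, v))) (k, w) := by
  by_cases hm : cm.contains k = true
  · have e1 : pvAddC cm t (k, v + w)
        = (pvAddC cm t (k, v)).insert (cm.getD k "") ((pvAddC cm t (k, v)).getD (cm.getD k "") 0 + w) := by
      simp only [pvAddC, hm, if_pos]
      rw [PySem.Dict.getD_insert_self, PySem.Dict.insert_insert_self]
      ring_nf
    rw [e1, pv_addC_out cm _ w zs _ (by simp only [pvAddC, hm, if_pos]; exact PySem.Dict.contains_insert_self _ _ _)]
    simp only [pvAddC, hm, if_pos]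
  · have hm' : cm.contains k = false := by simpa using hm
    simp only [pvAddC, hm', Bool.false_eq_true, ite_false]

theorem pv_remap_eq (cm : PySem.Dict String String) (d : PySem.Dict String Int) (hnd : d.keys.Nodup) :
    pvRemapA cm d = d.items.foldl (pvAddC cm) PySem.Dict.empty := by
  unfold pvRemapA
  refine Eq.trans (pv_foldl_keys_getD d hnd 0
    (F := fun temp kv =>
      if cm.contains kv.1 then
        if temp.contains (cm.getD kv.1 "") then temp.insert (cm.getD kv.1 "") (temp.getD (cm.getD kv.1 "") 0 + kv.2)
        else temp.insert (cm.getD kv.1 "") kv.2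
      else temp) PySem.Dict.empty) ?_
  apply PySem.List.foldl_congr_mem
  intro acc kv _
  by_cases hm : cm.contains kv.1 = true
  · simp only [pvAddC, hm, if_pos]
    by_cases hc : acc.contains (cm.getD kv.1 "") = true
    · simp [hc]
    · have hc' : acc.contains (cm.getD kv.1 "") = false := by simpa using hc
      rw [if_neg (by simp [hc']), PySem.Dict.getD_of_not_contains _ _ hc']
      norm_num
  · have hm' : cm.contains kv.1 = false := by simpa using hm
    simp [pvAddC, hm']

theorem pv_cond_insert_fold (l : List (String × Int)) :
    ∀ c : PySem.Dict String Int, (l.map (fun p => p.1)).Nodup →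
    l.foldl (fun s p => if s.contains p.1 then s else s.insert p.1 p.2) c
      = PySem.Dict.mk (c.items ++ l.filter (fun p => !c.contains p.1)) := by
  induction l with
  | nil => intro c _; simp
  | cons q l ih =>
    intro c hl
    have hl' : (l.map (fun p => p.1)).Nodup := (List.nodup_cons.mp hl).2
    have hq : q.1 ∉ l.map (fun p => p.1) := (List.nodup_cons.mp hl).1
    simp only [List.foldl_cons]
    by_cases hc : c.contains q.1 = true
    · rw [if_pos hc, ih c hl', List.filter_cons]
      simp [hc]
    · have hc' : c.contains q.1 = false := by simpa using hc
      rw [if_neg (by simp [hc']), ih _ hl', List.filter_cons]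
      have hitems : (c.insert q.1 q.2).items = c.items ++ [q] := by
        simpa using PySem.Dict.items_insert_of_not_contains c q.2 hc'
      have hfil : l.filter (fun p => !(c.insert q.1 q.2).contains p.1)
          = l.filter (fun p => !c.contains p.1) := by
        apply List.filter_congr
        intro p hp
        have : (p.1 == q.1) = false := by
          simp only [beq_eq_false_iff_ne, ne_eq]
          intro h; exact hq (h ▸ List.mem_map_of_mem hp)
        rw [PySem.Dict.contains_insert]
        simp [this]
      rw [hitems, hfil]
      simp [hc', List.append_assoc]

theorem pv_combine_eq (d1 d2 : PySem.Dict String Int) (h1 : d1.keys.Nodup) (h2 : d2.keys.Nodup) :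
    pvCombineDict d1 d2
      = PySem.Dict.mk (d1.items.map (pvCMap d2) ++ d2.items.filter (fun p => !d1.contains p.1)) := by
  unfold pvCombineDict
  have hfold1 : d1.keys.foldl (fun comb k =>
      if d2.contains k then comb.insert k (d1.getD k 0 + d2.getD k 0)
      else comb.insert k (d1.getD k 0)) PySem.Dict.empty
      = PySem.Dict.mk (d1.items.map (pvCMap d2)) := by
    refine Eq.trans (pv_foldl_keys_getD d1 h1 0
      (F := fun comb p =>
        if d2.contains p.1 then comb.insert p.1 (p.2 + d2.getD p.1 0)
        else comb.insert p.1 p.2) PySem.Dict.empty) ?_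
    have hstep : d1.items.foldl (fun comb p =>
        if d2.contains p.1 then comb.insert p.1 (p.2 + d2.getD p.1 0)
        else comb.insert p.1 p.2) PySem.Dict.empty
        = d1.items.foldl (fun comb p => comb.insert p.1 (pvCMap d2 p).2) PySem.Dict.empty := by
      apply PySem.List.foldl_congr_mem
      intro acc p _
      by_cases hd : d2.contains p.1 = true <;> simp [pvCMap, hd]
    rw [hstep]
    apply PySem.Dict.ext
    rw [PySem.Dict.items_foldl_insert_fresh d1.items (fun p => p.1) (fun p => (pvCMap d2 p).2)
      PySem.Dict.empty (fun p _ => by simp) h1]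
    rfl
  rw [hfold1]
  refine Eq.trans (pv_foldl_keys_getD d2 h2 0
    (F := fun comb p => if comb.contains p.1 then comb else comb.insert p.1 p.2)
    (PySem.Dict.mk (d1.items.map (pvCMap d2)))) ?_
  rw [pv_cond_insert_fold d2.items _ h2]
  congr 1
  · congr 1
    apply List.filter_congr
    intro p _
    have hkeys : (PySem.Dict.mk (d1.items.map (pvCMap d2))).keys = d1.keys := by
      show (d1.items.map (pvCMap d2)).map (fun p => p.1) = d1.items.map (fun p => p.1)
      rw [List.map_map]
      rfl
    rw [PySem.Dict.contains_eq_decide_mem_keys, PySem.Dict.contains_eq_decide_mem_keys, hkeys]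

theorem pv_combine_nodup (d1 d2 : PySem.Dict String Int) (h1 : d1.keys.Nodup) (h2 : d2.keys.Nodup) :
    (pvCombineDict d1 d2).keys.Nodup := by
  rw [pv_combine_eq d1 d2 h1 h2]
  show ((d1.items.map (pvCMap d2) ++ d2.items.filter (fun p => !d1.contains p.1)).map (fun p => p.1)).Nodup
  rw [List.map_append, List.nodup_append]
  refine ⟨by rw [List.map_map]; exact h1, ?_, ?_⟩
  · have hsub : ((d2.items.filter (fun p => !d1.contains p.1)).map (fun p => p.1)).Sublist
        (d2.items.map (fun p => p.1)) := List.Sublist.map _ List.filter_sublist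
    exact hsub.nodup h2
  · intro a ha b hb
    rw [List.map_map] at ha
    simp only [List.mem_map] at ha hb
    obtain ⟨p, hp, hpa⟩ := ha
    obtain ⟨q, hq, hqb⟩ := hb
    have hpa : p.1 = a := by simpa [pvCMap] using hpa
    have hqf := List.of_mem_filter hq
    intro hab
    rw [← hpa, ← hqb] at hab
    have : d1.contains q.1 = true := by
      rw [PySem.Dict.contains_eq_decide_mem_keys]
      have : q.1 ∈ d1.keys := by
        show q.1 ∈ d1.items.map (fun p => p.1)
        exact hab ▸ List.mem_map_of_mem hp
      simp [this]
    simp [this] at hqf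

theorem pv_mk_append_singleton (l : List (String × Int)) (q : String × Int)
    (h : (PySem.Dict.mk l : PySem.Dict String Int).contains q.1 = false) :
    (PySem.Dict.mk (l ++ [q]) : PySem.Dict String Int) = (PySem.Dict.mk l).insert q.1 q.2 := by
  apply PySem.Dict.ext
  rw [PySem.Dict.items_insert_of_not_contains _ _ h]

theorem pv_contains_mk_eq (l : List (String × Int)) (k : String) :
    (PySem.Dict.mk l : PySem.Dict String Int).contains k = decide (k ∈ l.map (fun p => p.1)) :=
  PySem.Dict.contains_eq_decide_mem_keys _ _

theorem pv_cmap_insert_ne (d : PySem.Dict String Int) (q1 : String) (q2 : Int) (p : String × Int)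
    (hne : p.1 ≠ q1) : pvCMap (d.insert q1 q2) p = pvCMap d p := by
  unfold pvCMap
  rw [PySem.Dict.contains_insert, PySem.Dict.getD_insert_of_ne _ _ _ hne]
  simp [hne]

theorem pv_foldl_mid (cm : PySem.Dict String String) (A B : List (String × Int)) (k : String)
    (v w : Int) (t : PySem.Dict String Int) :
    (A ++ (k, v + w) :: B).foldl (pvAddC cm) t
      = pvAddC cm ((A ++ (k, v) :: B).foldl (pvAddC cm) t) (k, w) := by
  rw [List.foldl_append, List.foldl_cons, List.foldl_append, List.foldl_cons]
  exact pv_addC_mid cm _ k v w B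

theorem pv_L (cm : PySem.Dict String String) (d1 : PySem.Dict String Int) (h1 : d1.keys.Nodup)
    (l2 : List (String × Int)) :
    (l2.map (fun p => p.1)).Nodup → ∀ t : PySem.Dict String Int,
    (pvCombineDict d1 (PySem.Dict.mk l2)).items.foldl (pvAddC cm) t
      = l2.foldl (pvAddC cm) (d1.items.foldl (pvAddC cm) t) := by
  induction l2 using List.reverseRecOn with
  | nil =>
    intro _ t
    rw [pv_combine_eq d1 _ h1 (by simp [PySem.Dict.keys])]
    have hmap : ∀ p ∈ d1.items, pvCMap (PySem.Dict.mk []) p = id p := by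
      intro p _
      simp [pvCMap]
    show (d1.items.map (pvCMap (PySem.Dict.mk [])) ++ []).foldl (pvAddC cm) t = _
    rw [List.append_nil, List.map_congr_left hmap, List.map_id]
    simp
  | append_singleton l2 q ih =>
    intro hnd t
    have hl2 : (l2.map (fun p => p.1)).Nodup := by
      rw [List.map_append] at hnd; exact hnd.of_append_left
    have hqfresh : q.1 ∉ l2.map (fun p => p.1) := by
      rw [List.map_append, List.nodup_append] at hnd
      intro hmem
      exact hnd.2.2 _ hmem _ (by simp) rfl
    have hq2 : (PySem.Dict.mk l2 : PySem.Dict String Int).contains q.1 = false := by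
      rw [pv_contains_mk_eq]; simpa using hqfresh
    have hdins : (PySem.Dict.mk (l2 ++ [q]) : PySem.Dict String Int)
        = (PySem.Dict.mk l2).insert q.1 q.2 := pv_mk_append_singleton l2 q hq2
    rw [pv_combine_eq d1 _ h1 (by exact hnd)]
    have hprev := ih hl2 t
    rw [pv_combine_eq d1 _ h1 (by simpa using hl2)] at hprev
    have hrhs : (l2 ++ [q]).foldl (pvAddC cm) (d1.items.foldl (pvAddC cm) t)
        = pvAddC cm (l2.foldl (pvAddC cm) (d1.items.foldl (pvAddC cm) t)) q := by
      rw [List.foldl_append, List.foldl_cons, List.foldl_nil]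
    by_cases hq1 : d1.contains q.1 = true
    · -- q's key is shared with d1: its contribution moves into the mapped d1 entry
      have hkmem : q.1 ∈ d1.items.map (fun p => p.1) :=
        (PySem.Dict.contains_iff_mem_keys d1 q.1).mp hq1
      obtain ⟨p₀, hp₀, hp₀1⟩ := List.mem_map.mp hkmem
      obtain ⟨ys, zs, hsplit⟩ := List.append_of_mem hp₀
      have hkeysd1 : ((ys ++ p₀ :: zs).map (fun p => p.1)).Nodup := by rw [← hsplit]; exact h1
      rw [List.map_append, List.map_cons] at hkeysd1
      have hysne : ∀ p ∈ ys, p.1 ≠ q.1 := by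
        intro p hp he
        rw [List.nodup_append] at hkeysd1
        exact hkeysd1.2.2 _ (List.mem_map_of_mem hp) _ (by simp) (he.trans hp₀1.symm)
      have hzsne : ∀ p ∈ zs, p.1 ≠ q.1 := by
        intro p hp he
        rw [List.nodup_append] at hkeysd1
        have h' := hkeysd1.2.1
        rw [List.nodup_cons] at h'
        exact h'.1 (hp₀1 ▸ he ▸ List.mem_map_of_mem hp)
      have hmap : d1.items.map (pvCMap (PySem.Dict.mk (l2 ++ [q])))
          = ys.map (pvCMap (PySem.Dict.mk l2)) ++ (q.1, p₀.2 + q.2) :: zs.map (pvCMap (PySem.Dict.mk l2)) := by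
        rw [hsplit, List.map_append, List.map_cons]
        congr 1
        · exact List.map_congr_left (fun p hp => hdins ▸ pv_cmap_insert_ne _ _ _ _ (hysne p hp))
        · congr 1
          · rw [hdins, pvCMap, hp₀1]
            simp [PySem.Dict.contains_insert_self, PySem.Dict.getD_insert_self]
          · exact List.map_congr_left (fun p hp => hdins ▸ pv_cmap_insert_ne _ _ _ _ (hzsne p hp))
      have hmapold : d1.items.map (pvCMap (PySem.Dict.mk l2))
          = ys.map (pvCMap (PySem.Dict.mk l2)) ++ (q.1, p₀.2) :: zs.map (pvCMap (PySem.Dict.mk l2)) := by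
        rw [hsplit, List.map_append, List.map_cons]
        congr 2
        rw [pvCMap, hp₀1]
        simp [hq2]
      have hfil : (l2 ++ [q]).filter (fun p => !d1.contains p.1)
          = l2.filter (fun p => !d1.contains p.1) := by
        rw [List.filter_append]; simp [hq1]
      show (d1.items.map (pvCMap (PySem.Dict.mk (l2 ++ [q]))) ++ (l2 ++ [q]).filter (fun p => !d1.contains p.1)).foldl (pvAddC cm) t = _
      rw [hmap, hfil, hrhs, List.append_assoc, List.cons_append,
          pv_foldl_mid cm _ _ q.1 p₀.2 q.2 t]
      rw [show ((q.1, p₀.2) : String × Int) :: (zs.map (pvCMap (PySem.Dict.mk l2)) ++ l2.filter (fun p => !d1.contains p.1))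
            = ((q.1, p₀.2) :: zs.map (pvCMap (PySem.Dict.mk l2))) ++ l2.filter (fun p => !d1.contains p.1) from rfl,
          ← List.append_assoc]
      rw [← hmapold] at *
      rw [hprev]
    · -- q's key is fresh for d1: it stays a new trailing entry
      have hq1' : d1.contains q.1 = false := by simpa using hq1
      have hmap : d1.items.map (pvCMap (PySem.Dict.mk (l2 ++ [q])))
          = d1.items.map (pvCMap (PySem.Dict.mk l2)) := by
        apply List.map_congr_left
        intro p hp
        have hne : p.1 ≠ q.1 := by
          intro he
          have hc : d1.contains p.1 = true := by
            rw [PySem.Dict.contains_iff_mem_keys]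
            exact List.mem_map_of_mem hp
          rw [← he] at hq1'
          rw [hq1'] at hc
          exact Bool.false_ne_true hc
        exact hdins ▸ pv_cmap_insert_ne _ _ _ _ hne
      have hfil : (l2 ++ [q]).filter (fun p => !d1.contains p.1)
          = l2.filter (fun p => !d1.contains p.1) ++ [q] := by
        rw [List.filter_append]; simp [hq1']
      show (d1.items.map (pvCMap (PySem.Dict.mk (l2 ++ [q]))) ++ (l2 ++ [q]).filter (fun p => !d1.contains p.1)).foldl (pvAddC cm) t = _
      rw [hmap, hfil, hrhs, ← List.append_assoc, List.foldl_append, List.foldl_cons, List.foldl_nil, hprev]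

theorem pv_inner_loop (cm : PySem.Dict String String) (co : String) (l : List (String × Int)) :
    ∀ res : PySem.Dict String (PySem.Dict String Int), res.contains co = true → res.keys.Nodup →
    l.foldl (fun res kv =>
        if cm.contains kv.1 then
          res.insert co ((res.getD co PySem.Dict.empty).insert (cm.getD kv.1 "")
            ((res.getD co PySem.Dict.empty).getD (cm.getD kv.1 "") 0 + kv.2))
        else res) res
      = res.insert co (l.foldl (pvAddC cm) (res.getD co PySem.Dict.empty)) := by
  induction l with
  | nil =>
    intro res hc hnd
    rw [List.foldl_nil, List.foldl_nil, pv_insert_getD_self res co _ hc hnd]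
  | cons kv l ih =>
    intro res hc hnd
    rw [List.foldl_cons, List.foldl_cons]
    by_cases hm : cm.contains kv.1 = true
    · rw [if_pos hm]
      have hstep : pvAddC cm (res.getD co PySem.Dict.empty) kv
          = (res.getD co PySem.Dict.empty).insert (cm.getD kv.1 "")
              ((res.getD co PySem.Dict.empty).getD (cm.getD kv.1 "") 0 + kv.2) := by
        simp [pvAddC, hm]
      set res' := res.insert co ((res.getD co PySem.Dict.empty).insert (cm.getD kv.1 "")
        ((res.getD co PySem.Dict.empty).getD (cm.getD kv.1 "") 0 + kv.2)) with hres'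
      have h1 : res'.contains co = true := PySem.Dict.contains_insert_self _ _ _
      have h2 : res'.keys.Nodup := PySem.Dict.nodup_keys_insert _ _ _ hnd
      rw [ih res' h1 h2, hres']
      rw [PySem.Dict.getD_insert_self, PySem.Dict.insert_insert_self, hstep]
    · have hm' : cm.contains kv.1 = false := by simpa using hm
      rw [if_neg (by simp [hm']), ih res hc hnd]
      have : pvAddC cm (res.getD co PySem.Dict.empty) kv = res.getD co PySem.Dict.empty := by
        simp [pvAddC, hm']
      rw [this]

theorem pv_mv_keys (cm : PySem.Dict String String) (d : PySem.Dict String (PySem.Dict String Int)) :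
    (pvMV cm d).keys = d.keys := by
  show (d.items.map (fun p => (p.1, pvRemapA cm p.2))).map (fun p => p.1) = d.items.map (fun p => p.1)
  rw [List.map_map]
  rfl

theorem pv_mv_contains (cm : PySem.Dict String String) (d : PySem.Dict String (PySem.Dict String Int)) (k : String) :
    (pvMV cm d).contains k = d.contains k := by
  rw [PySem.Dict.contains_eq_decide_mem_keys, PySem.Dict.contains_eq_decide_mem_keys, pv_mv_keys]

theorem pv_mv_nodup (cm : PySem.Dict String String) (d : PySem.Dict String (PySem.Dict String Int))
    (h : d.keys.Nodup) : (pvMV cm d).keys.Nodup := by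
  rw [pv_mv_keys]; exact h

theorem pv_mv_insert (cm : PySem.Dict String String) (d : PySem.Dict String (PySem.Dict String Int))
    (k : String) (v : PySem.Dict String Int) :
    pvMV cm (d.insert k v) = (pvMV cm d).insert k (pvRemapA cm v) := by
  apply PySem.Dict.ext
  by_cases hc : d.contains k = true
  · have hc' : (pvMV cm d).contains k = true := by rw [pv_mv_contains]; exact hc
    show ((d.insert k v).items.map (fun p => (p.1, pvRemapA cm p.2))) = _
    rw [PySem.Dict.items_insert_of_contains _ _ hc, PySem.Dict.items_insert_of_contains _ _ hc']
    show _ = ((d.items.map (fun p => (p.1, pvRemapA cm p.2))).map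
      (fun p => if (p.1 == k) = true then (k, pvRemapA cm v) else p))
    rw [List.map_map, List.map_map]
    apply List.map_congr_left
    intro p _
    by_cases hp : p.1 = k <;> simp [hp]
  · have hcf : d.contains k = false := by simpa using hc
    have hcf' : (pvMV cm d).contains k = false := by rw [pv_mv_contains]; exact hcf
    show ((d.insert k v).items.map (fun p => (p.1, pvRemapA cm p.2))) = _
    rw [PySem.Dict.items_insert_of_not_contains _ _ hcf, PySem.Dict.items_insert_of_not_contains _ _ hcf']
    rw [List.map_append]
    rfl

theorem pv_mv_getD (cm : PySem.Dict String String) (d : PySem.Dict String (PySem.Dict String Int))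
    (k : String) (hnd : d.keys.Nodup) (hc : d.contains k = true) :
    (pvMV cm d).getD k PySem.Dict.empty = pvRemapA cm (d.getD k PySem.Dict.empty) := by
  have hkmem : k ∈ d.items.map (fun p => p.1) := (PySem.Dict.contains_iff_mem_keys d k).mp hc
  obtain ⟨p, hp, hp1⟩ := List.mem_map.mp hkmem
  have hval : d.getD k PySem.Dict.empty = p.2 :=
    PySem.Dict.getD_of_mem_items d (hp1 ▸ hp) hnd _
  have hmem : (k, pvRemapA cm p.2) ∈ (pvMV cm d).items := by
    show (k, pvRemapA cm p.2) ∈ d.items.map (fun p => (p.1, pvRemapA cm p.2))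
    exact hp1 ▸ List.mem_map_of_mem hp
  rw [hval]
  exact PySem.Dict.getD_of_mem_items _ hmem (pv_mv_nodup cm d hnd) _

theorem pv_main (cm : PySem.Dict String String) (l : List (String × PySem.Dict String Int)) :
    ∀ ud : PySem.Dict String (PySem.Dict String Int), ud.keys.Nodup →
    (∀ p ∈ l, p.2.keys.Nodup) → (∀ p ∈ ud.items, p.2.keys.Nodup) →
    l.foldl (fun res p =>
        if cm.contains p.1 then
          (p.2.items.foldl (fun res kv =>
            if cm.contains kv.1 then
              res.insert (cm.getD p.1 "") ((res.getD (cm.getD p.1 "") PySem.Dict.empty).insert (cm.getD kv.1 "")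
                ((res.getD (cm.getD p.1 "") PySem.Dict.empty).getD (cm.getD kv.1 "") 0 + kv.2))
            else res) (res.setdefault (cm.getD p.1 "") PySem.Dict.empty))
        else res) (pvMV cm ud)
      = pvMV cm (l.foldl (fun ud p =>
          if cm.contains p.1 then
            if ud.contains (cm.getD p.1 "") then
              ud.insert (cm.getD p.1 "") (pvCombineDict (ud.getD (cm.getD p.1 "") PySem.Dict.empty) p.2)
            else ud.insert (cm.getD p.1 "") p.2
          else ud) ud) := by
  induction l with
  | nil => intro ud _ _ _; rfl
  | cons p l ih =>
    intro ud hnd hl hvals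
    have hp2 : p.2.keys.Nodup := hl p (by simp)
    have hl' : ∀ q ∈ l, q.2.keys.Nodup := fun q hq => hl q (by simp [hq])
    rw [List.foldl_cons, List.foldl_cons]
    by_cases hm : cm.contains p.1 = true
    · rw [if_pos hm, if_pos hm]
      set co := cm.getD p.1 "" with hco
      by_cases hc : ud.contains co = true
      · -- class already present: combine path
        rw [if_pos hc]
        have hold : (ud.getD co PySem.Dict.empty).keys.Nodup := by
          have hkmem : co ∈ ud.items.map (fun r => r.1) := (PySem.Dict.contains_iff_mem_keys ud co).mp hc
          obtain ⟨r, hr, hr1⟩ := List.mem_map.mp hkmem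
          have : ud.getD co PySem.Dict.empty = r.2 := PySem.Dict.getD_of_mem_items ud (hr1 ▸ hr) hnd _
          rw [this]; exact hvals r hr
        have hcmv : (pvMV cm ud).contains co = true := by rw [pv_mv_contains]; exact hc
        rw [PySem.Dict.setdefault_of_contains _ _ hcmv]
        rw [pv_inner_loop cm co p.2.items (pvMV cm ud) hcmv (pv_mv_nodup cm ud hnd)]
        have hbkt : (pvMV cm ud).getD co PySem.Dict.empty = pvRemapA cm (ud.getD co PySem.Dict.empty) :=
          pv_mv_getD cm ud co hnd hc
        have hLready : p.2.items.foldl (pvAddC cm) (pvRemapA cm (ud.getD co PySem.Dict.empty))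
            = pvRemapA cm (pvCombineDict (ud.getD co PySem.Dict.empty) p.2) := by
          have hcomb := pv_L cm (ud.getD co PySem.Dict.empty) hold p.2.items hp2 PySem.Dict.empty
          rw [pv_remap_eq cm _ (pv_combine_nodup _ _ hold hp2), pv_remap_eq cm _ hold]
          exact hcomb.symm
        rw [hbkt, hLready, ← pv_mv_insert]
        -- apply the induction hypothesis to the new state
        have hud' : (ud.insert co (pvCombineDict (ud.getD co PySem.Dict.empty) p.2)).keys.Nodup :=
          PySem.Dict.nodup_keys_insert _ _ _ hnd
        have hvals' : ∀ q ∈ (ud.insert co (pvCombineDict (ud.getD co PySem.Dict.empty) p.2)).items, q.2.keys.Nodup := by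
          intro q hq
          rcases (PySem.Dict.mem_items_insert _ _ _ _).mp hq with h | ⟨h, _⟩
          · rw [h]; exact pv_combine_nodup _ _ hold hp2
          · exact hvals q h
        exact ih _ hud' hl' hvals'
      · -- new class: setdefault inserts an empty bucket
        have hcf : ud.contains co = false := by simpa using hc
        rw [if_neg (by simp [hcf])]
        have hcmf : (pvMV cm ud).contains co = false := by rw [pv_mv_contains]; exact hcf
        rw [PySem.Dict.setdefault_of_not_contains _ _ hcmf]
        have hcins : ((pvMV cm ud).insert co PySem.Dict.empty).contains co = true :=
          PySem.Dict.contains_insert_self _ _ _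
        rw [pv_inner_loop cm co p.2.items _ hcins
          (PySem.Dict.nodup_keys_insert _ _ _ (pv_mv_nodup cm ud hnd))]
        rw [PySem.Dict.getD_insert_self, PySem.Dict.insert_insert_self]
        have hremap : p.2.items.foldl (pvAddC cm) PySem.Dict.empty = pvRemapA cm p.2 :=
          (pv_remap_eq cm p.2 hp2).symm
        rw [hremap, ← pv_mv_insert]
        have hud' : (ud.insert co p.2).keys.Nodup := PySem.Dict.nodup_keys_insert _ _ _ hnd
        have hvals' : ∀ q ∈ (ud.insert co p.2).items, q.2.keys.Nodup := by
          intro q hq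
          rcases (PySem.Dict.mem_items_insert _ _ _ _).mp hq with h | ⟨h, _⟩
          · rw [h]; exact hp2
          · exact hvals q h
        exact ih _ hud' hl' hvals'
    · rw [if_neg hm, if_neg hm]
      exact ih ud hnd hl' hvals

theorem pv_ports_eq (dictionary : List (String × List (String × Int))) (class_mapping : List (String × String))
    (h1 : (dictionary.map (fun p => p.1)).Nodup)
    (h2 : ∀ p ∈ dictionary, (p.2.map (fun q => q.1)).Nodup) :
    get_unique_entity_nested dictionary class_mapping = get_unique_entity_nested_alt dictionary class_mapping := by
  unfold get_unique_entity_nested get_unique_entity_nested_alt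
  set cm : PySem.Dict String String := PySem.Dict.mk class_mapping with hcm
  set dd : PySem.Dict String (PySem.Dict String Int) :=
    PySem.Dict.mk (dictionary.map (fun p => (p.1, PySem.Dict.mk p.2))) with hdd
  have hddnd : dd.keys.Nodup := by
    show ((dictionary.map (fun p => (p.1, PySem.Dict.mk p.2))).map (fun p => p.1)).Nodup
    rw [List.map_map]
    exact h1
  -- A's phase-1 loop over keys = fold over dd.items
  have hA : dd.keys.foldl (fun ud key =>
      if cm.contains key then
        if ud.contains (cm.getD key "") then
          ud.insert (cm.getD key "") (pvCombineDict (ud.getD (cm.getD key "") PySem.Dict.empty) (dd.getD key PySem.Dict.empty))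
        else ud.insert (cm.getD key "") (dd.getD key PySem.Dict.empty)
      else ud) PySem.Dict.empty
      = dd.items.foldl (fun ud p =>
          if cm.contains p.1 then
            if ud.contains (cm.getD p.1 "") then
              ud.insert (cm.getD p.1 "") (pvCombineDict (ud.getD (cm.getD p.1 "") PySem.Dict.empty) p.2)
            else ud.insert (cm.getD p.1 "") p.2
          else ud) PySem.Dict.empty :=
    pv_foldl_keys_getD dd hddnd PySem.Dict.empty
      (F := fun ud p =>
        if cm.contains p.1 then
          if ud.contains (cm.getD p.1 "") then
            ud.insert (cm.getD p.1 "") (pvCombineDict (ud.getD (cm.getD p.1 "") PySem.Dict.empty) p.2)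
          else ud.insert (cm.getD p.1 "") p.2
        else ud) PySem.Dict.empty
  -- B's loop over the raw pairs = fold over dd.items
  have hB : dictionary.foldl (fun res p =>
      if cm.contains p.1 then
        p.2.foldl (fun res kv =>
            if cm.contains kv.1 then
              res.insert (cm.getD p.1 "") ((res.getD (cm.getD p.1 "") PySem.Dict.empty).insert (cm.getD kv.1 "")
                ((res.getD (cm.getD p.1 "") PySem.Dict.empty).getD (cm.getD kv.1 "") 0 + kv.2))
            else res) (res.setdefault (cm.getD p.1 "") PySem.Dict.empty)
      else res) (PySem.Dict.empty : PySem.Dict String (PySem.Dict String Int))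
      = dd.items.foldl (fun res p =>
        if cm.contains p.1 then
          (p.2.items.foldl (fun res kv =>
            if cm.contains kv.1 then
              res.insert (cm.getD p.1 "") ((res.getD (cm.getD p.1 "") PySem.Dict.empty).insert (cm.getD kv.1 "")
                ((res.getD (cm.getD p.1 "") PySem.Dict.empty).getD (cm.getD kv.1 "") 0 + kv.2))
            else res) (res.setdefault (cm.getD p.1 "") PySem.Dict.empty))
        else res) PySem.Dict.empty := by
    show _ = ((dictionary.map (fun p => (p.1, PySem.Dict.mk p.2))).foldl _ _)
    rw [List.foldl_map]
  have hvals : ∀ p ∈ dd.items, p.2.keys.Nodup := by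
    intro p hp
    obtain ⟨x, hx, hxe⟩ := List.mem_map.mp hp
    rw [← hxe]
    exact h2 x hx
  have hmain := pv_main cm dd.items PySem.Dict.empty (by simp [PySem.Dict.keys, PySem.Dict.empty])
    hvals (by simp [PySem.Dict.empty])
  have hempty : pvMV cm PySem.Dict.empty = (PySem.Dict.empty : PySem.Dict String (PySem.Dict String Int)) := rfl
  rw [hempty] at hmain
  show ((dd.keys.foldl (fun ud key =>
      if cm.contains key then
        if ud.contains (cm.getD key "") then
          ud.insert (cm.getD key "") (pvCombineDict (ud.getD (cm.getD key "") PySem.Dict.empty) (dd.getD key PySem.Dict.empty))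
        else ud.insert (cm.getD key "") (dd.getD key PySem.Dict.empty)
      else ud) PySem.Dict.empty).items.map (fun p => (p.1, pvRemapA cm p.2))).map (fun p => (p.1, p.2.items))
      = (dictionary.foldl (fun res p =>
      if cm.contains p.1 then
        p.2.foldl (fun res kv =>
            if cm.contains kv.1 then
              res.insert (cm.getD p.1 "") ((res.getD (cm.getD p.1 "") PySem.Dict.empty).insert (cm.getD kv.1 "")
                ((res.getD (cm.getD p.1 "") PySem.Dict.empty).getD (cm.getD kv.1 "") 0 + kv.2))
            else res) (res.setdefault (cm.getD p.1 "") PySem.Dict.empty)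
      else res) (PySem.Dict.empty : PySem.Dict String (PySem.Dict String Int))).items.map (fun p => (p.1, p.2.items))
  rw [hA, hB, hmain]
  rfl

-- ===== VERDICT (by name: the statement is the Claim_ definition above) =====
theorem get_unique_entity_nested_spec : Claim_equal_get_unique_entity_nested := by
  intro dictionary class_mapping _ hpre
  unfold Spec_get_unique_entity_nested
  exact pv_ports_eq dictionary class_mapping hpre.1 hpre.2
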